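-- pv_equiv track=rewrite | github.com/sjdeak/interview-practice | contest/kickstart/practice/18F-anagrams/main.py | buildPrefixCounter
-- ===== SOURCE A (Python) =====
-- from collections import defaultdict
--
-- def buildPrefixCounter(S):
--   """
--   :return prefixSumCounter[i] A[:i]的前缀和字符计数器
--   """
--   d = defaultdict(int)
--   prefixSumCounter = [d]
--   for ch in S:
--     d = d.copy()
--     d[ch] += 1
--     prefixSumCounter.append(d)
--   return prefixSumCounter
-- ===== SOURCE B (Python) =====
-- from collections import defaultdict
--
-- def buildPrefixCounter(S):
--     prefixSumCounter = []
--     for i in range(len(S) + 1):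
--         d = defaultdict(int)
--         for ch in S[:i]:
--             d[ch] += 1
--         prefixSumCounter.append(d)
--     return prefixSumCounter
-- ===== Notes on version B (the rewrite author's own statement) =====
-- stated objective: alternative
-- what changed: B recomputes each prefix snapshot from scratch with a fresh defaultdict over S[:i] for every i, instead of A's incremental copy-and-increment of the previous dict.
import Mathlib
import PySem

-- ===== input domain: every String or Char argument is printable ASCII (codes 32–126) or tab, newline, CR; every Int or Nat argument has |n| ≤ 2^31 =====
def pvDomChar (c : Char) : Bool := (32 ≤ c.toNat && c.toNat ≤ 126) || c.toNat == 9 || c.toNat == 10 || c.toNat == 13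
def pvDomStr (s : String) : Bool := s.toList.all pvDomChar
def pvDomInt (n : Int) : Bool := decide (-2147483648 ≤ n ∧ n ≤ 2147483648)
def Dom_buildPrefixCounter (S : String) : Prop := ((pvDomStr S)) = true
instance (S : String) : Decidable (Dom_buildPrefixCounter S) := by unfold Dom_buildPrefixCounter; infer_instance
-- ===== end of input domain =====

-- B recomputes each prefix snapshot from scratch instead of A's incremental copy; same values (objective: alternative).

-- ===== PORT A =====
-- incremental: copy previous dict, increment current char, append
def buildPrefixCounter (S : String) : List (List (String × Int)) :=
  (S.toList.foldl
    (fun (st : PySem.Dict String Int × List (List (String × Int))) ch =>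
      let d := st.1.modify (String.mk [ch]) 0 (· + 1)
      (d, st.2 ++ [d.items]))
    ((PySem.Dict.empty : PySem.Dict String Int),
     [(PySem.Dict.empty : PySem.Dict String Int).items])).2

-- ===== PORT B =====
-- from scratch: for each i in range(len(S)+1), count S[:i] into a fresh dict
def buildPrefixCounter_alt (S : String) : List (List (String × Int)) :=
  (PySem.List.pyRange 0 ((S.toList.length : Int) + 1) 1).map
    (fun i =>
      ((PySem.List.slice S.toList none (some i)).foldl
        (fun (d : PySem.Dict String Int) ch => d.modify (String.mk [ch]) 0 (· + 1))
        PySem.Dict.empty).items)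

-- ===== PRECONDITION & SPEC =====
def Spec_buildPrefixCounter (S : String) (out : List (List (String × Int))) : Prop := out = buildPrefixCounter_alt S
instance (S : String) (out : List (List (String × Int))) : Decidable (Spec_buildPrefixCounter S out) := by unfold Spec_buildPrefixCounter; infer_instance

-- ===== CLAIM (what is proved, stated in full; the proofs are below) =====
def Claim_equal_buildPrefixCounter : Prop := ∀ (S : String), Dom_buildPrefixCounter S → Spec_buildPrefixCounter S (buildPrefixCounter S)

-- ===== LEMMAS AND PROOFS =====

-- the shared counting step
def pvStep (d : PySem.Dict String Int) (ch : Char) : PySem.Dict String Int :=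
  d.modify (String.mk [ch]) 0 (· + 1)

-- invariant of A's fold: the second component lists the counter of every nonempty prefix
lemma pvFoldA (cs : List Char) (d : PySem.Dict String Int) (acc : List (List (String × Int))) :
    (cs.foldl
      (fun (st : PySem.Dict String Int × List (List (String × Int))) ch =>
        let d := st.1.modify (String.mk [ch]) 0 (· + 1)
        (d, st.2 ++ [d.items])) (d, acc)).2
    = acc ++ (List.range cs.length).map
        (fun j => ((cs.take (j + 1)).foldl pvStep d).items) := by
  induction cs generalizing d acc with
  | nil => simp
  | cons c cs ih =>
      simp only [List.foldl_cons, List.length_cons, ih, List.range_succ_eq_map,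
        List.map_cons, List.map_map]
      simp [pvStep, List.append_assoc, Function.comp]

-- B rewritten over List.range / take
lemma pvAltEq (S : String) :
    buildPrefixCounter_alt S
      = (List.range (S.toList.length + 1)).map
          (fun k => ((S.toList.take k).foldl pvStep PySem.Dict.empty).items) := by
  unfold buildPrefixCounter_alt
  rw [PySem.List.pyRange_one]
  rw [List.map_map]
  apply List.map_congr_left
  intro k hk
  simp only [Function.comp, zero_add]
  rw [PySem.List.slice_to_natCast]
  rfl

-- ===== VERDICT (by name: the statement is the Claim_ definition above) =====
theorem buildPrefixCounter_spec : Claim_equal_buildPrefixCounter := by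
  intro S _
  unfold Spec_buildPrefixCounter
  rw [pvAltEq]
  unfold buildPrefixCounter
  rw [pvFoldA]
  rw [List.range_succ_eq_map, List.map_cons, List.map_map]
  simp [Function.comp]
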